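-- pv_equiv track=rewrite | github.com/MarcinKonowalczyk/baba | golf/golfing_full.py | ruleparser
-- ===== SOURCE A (Python) =====
-- PROPERTIES = ("y", "p", "n")  # you, push, win
--
-- NOUNS = ("b", "f", "r")  # baba, flag, rock (the nouns)
--
-- isproperty = lambda symbol: symbol in PROPERTIES
--
-- def make_behaviour(you=False, push=False, win=False):
--     """Helper to make a behaviour dictionary"""
--     return dict(zip(PROPERTIES, (you, push, win)))
--
-- def ruleparser(rules):
--     """Parse valid rules into behaviours and swaps"""
--
--     behaviours = {noun: (make_behaviour()) for noun in NOUNS}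
--     swaps = []
--
--     # Parse the rules
--     for subject, action in rules:
--         # Noun is (Noun OR Property)
--         if isproperty(action):  # Noun is a Property
--             behaviours[subject][action] = True
--         else:  # (Noun is Noun)
--             swaps.append((subject, action))
--     swaps = sorted(swaps)
--     return behaviours, swaps
-- ===== SOURCE B (Python) =====
-- PROPERTIES = ("y", "p", "n")  # you, push, win
--
-- NOUNS = ("b", "f", "r")  # baba, flag, rock (the nouns)
--
-- def ruleparser(rules):
--     """Parse valid rules into behaviours and swaps"""
--     # Single pass: partition the rules into property-rules and swaps (no dict mutation)
--     prop_rules = []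
--     swaps = []
--     for subject, action in rules:
--         (prop_rules if action in PROPERTIES else swaps).append((subject, action))
--     # Behaviours are pure membership queries against the partitioned property-rules
--     behaviours = {noun: {p: (noun, p) in prop_rules for p in PROPERTIES} for noun in NOUNS}
--     return behaviours, sorted(swaps)
-- ===== Notes on version B (the rewrite author's own statement) =====
-- stated objective: alternative
-- what changed: B never builds or mutates a behaviours dict during the scan: it only partitions the rules into property-rules and swaps in one pass, then derives every behaviour flag afterwards as a membership query (noun, p) in prop_rules; A instead pre-builds the dict-of-dicts and sets flags in place per rule.
import Mathlib
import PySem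

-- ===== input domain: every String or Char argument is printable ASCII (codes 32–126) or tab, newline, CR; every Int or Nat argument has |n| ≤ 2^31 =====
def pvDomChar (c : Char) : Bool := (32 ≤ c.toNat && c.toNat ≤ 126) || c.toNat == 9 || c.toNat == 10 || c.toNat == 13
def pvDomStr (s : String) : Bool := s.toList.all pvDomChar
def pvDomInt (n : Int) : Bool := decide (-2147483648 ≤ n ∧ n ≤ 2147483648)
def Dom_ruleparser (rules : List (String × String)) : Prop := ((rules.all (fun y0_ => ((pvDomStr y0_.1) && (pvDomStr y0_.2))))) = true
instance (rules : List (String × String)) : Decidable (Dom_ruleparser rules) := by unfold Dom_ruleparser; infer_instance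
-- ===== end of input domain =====

-- B never builds or mutates a behaviours dict during the scan: one pass only PARTITIONS the
-- rules into property-rules and swaps, and every behaviour flag is then a membership query
-- against the partitioned list; same cost, different algorithm (alternative).

-- ===== PORT A =====
def pvProperties : List String := ["y", "p", "n"]  -- PROPERTIES
def pvNouns : List String := ["b", "f", "r"]       -- NOUNS
def pvIsProperty (symbol : String) : Bool := pvProperties.contains symbol
-- make_behaviour(you, push, win) = dict(zip(PROPERTIES, (you, push, win)))
def pvMakeBehaviour (you push win : Bool) : PySem.Dict String Bool :=
  PySem.Dict.ofList (pvProperties.zip [you, push, win])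
-- loop body of A: behaviours[subject][action] = True  (KeyError on a subject not in
-- behaviours is excluded by Pre_, so Dict.modify's default is never used) / swaps.append
def pvStepA (st : PySem.Dict String (PySem.Dict String Bool) × List (String × String))
    (r : String × String) : PySem.Dict String (PySem.Dict String Bool) × List (String × String) :=
  if pvIsProperty r.2 then
    (st.1.modify r.1 PySem.Dict.empty (fun d => d.insert r.2 true), st.2)
  else
    (st.1, st.2 ++ [r])

def ruleparser (rules : List (String × String)) : (List (String × List (String × Bool))) × (List (String × String)) :=
  let behaviours : PySem.Dict String (PySem.Dict String Bool) :=
    PySem.Dict.ofList (pvNouns.map (fun noun => (noun, pvMakeBehaviour false false false)))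
  let st := rules.foldl pvStepA (behaviours, [])
  (st.1.items.map (fun p => (p.1, p.2.items)), PySem.List.sorted2 st.2 (·.1) (·.2) false)

-- ===== PORT B =====
-- loop body of B: (prop_rules if action in PROPERTIES else swaps).append((subject, action))
def pvStepPart (st : List (String × String) × List (String × String))
    (r : String × String) : List (String × String) × List (String × String) :=
  if pvProperties.contains r.2 then (st.1 ++ [r], st.2) else (st.1, st.2 ++ [r])

def ruleparser_alt (rules : List (String × String)) : (List (String × List (String × Bool))) × (List (String × String)) :=
  let st := rules.foldl pvStepPart ([], [])
  let behaviours := pvNouns.map (fun noun =>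
    (noun, pvProperties.map (fun p => (p, st.1.contains (noun, p)))))
  (behaviours, PySem.List.sorted2 st.2 (·.1) (·.2) false)

-- ===== PRECONDITION & SPEC =====
-- Pre_ excludes exactly the rules whose action is a property but whose subject is not a
-- noun: there Python A raises KeyError (B happens to return normally on those inputs).
def Pre_ruleparser (rules : List (String × String)) : Prop :=
  ∀ p ∈ rules, p.2 ∈ (["y", "p", "n"] : List String) → p.1 ∈ (["b", "f", "r"] : List String)
instance (rules : List (String × String)) : Decidable (Pre_ruleparser rules) := by
  unfold Pre_ruleparser; infer_instance
def pvWitness_ruleparser : (List (String × String)) := [("b", "y"), ("f", "r"), ("r", "n")]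
def Spec_ruleparser (rules : List (String × String)) (out : (List (String × List (String × Bool))) × (List (String × String))) : Prop := out = ruleparser_alt rules
instance (rules : List (String × String)) (out : (List (String × List (String × Bool))) × (List (String × String))) : Decidable (Spec_ruleparser rules out) := by unfold Spec_ruleparser; infer_instance

-- ===== CLAIM (what is proved, stated in full; the proofs are below) =====
def Claim_equal_ruleparser : Prop := ∀ (rules : List (String × String)), Dom_ruleparser rules → Pre_ruleparser rules → Spec_ruleparser rules (ruleparser rules)

-- ===== LEMMAS AND PROOFS =====

-- A's behaviour dict for one noun, reconstructed from B's partitioned property-rule list pr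
def pvD3 (pr : List (String × String)) (noun : String) : PySem.Dict String Bool :=
  PySem.Dict.mk [("y", pr.contains (noun, "y")), ("p", pr.contains (noun, "p")),
                 ("n", pr.contains (noun, "n"))]

-- A's whole behaviours dict, reconstructed from pr
def pvMkA (pr : List (String × String)) : PySem.Dict String (PySem.Dict String Bool) :=
  PySem.Dict.mk [("b", pvD3 pr "b"), ("f", pvD3 pr "f"), ("r", pvD3 pr "r")]

lemma pv_modifyA (pr : List (String × String)) (r : String × String)
    (hk : r.1 ∈ (["b", "f", "r"] : List String)) (ha : r.2 ∈ (["y", "p", "n"] : List String)) :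
    (pvMkA pr).modify r.1 PySem.Dict.empty (fun d => d.insert r.2 true) = pvMkA (pr ++ [r]) := by
  obtain ⟨s, a⟩ := r
  simp only [List.mem_cons, List.not_mem_nil, or_false] at hk ha
  rcases hk with rfl | rfl | rfl <;> rcases ha with rfl | rfl | rfl <;>
    simp [pvMkA, pvD3, PySem.Dict.modify, PySem.Dict.getD, PySem.Dict.get?,
      PySem.Dict.insert, PySem.Dict.contains]

lemma pv_loop_inv (rules : List (String × String)) (h : Pre_ruleparser rules)
    (pr sw : List (String × String)) :
    rules.foldl pvStepA (pvMkA pr, sw) =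
      (pvMkA (rules.foldl pvStepPart (pr, sw)).1, (rules.foldl pvStepPart (pr, sw)).2) := by
  induction rules generalizing pr sw with
  | nil => rfl
  | cons r rest ih =>
    have hrest : Pre_ruleparser rest := fun p hp => h p (List.mem_cons_of_mem r hp)
    by_cases hp : r.2 ∈ (["y", "p", "n"] : List String)
    · have hs : r.1 ∈ (["b", "f", "r"] : List String) := h r (List.mem_cons_self) hp
      have hcond : pvProperties.contains r.2 = true := by
        simp only [pvProperties, List.contains_eq_mem, decide_eq_true_eq]; exact hp
      simp only [List.foldl_cons, pvStepA, pvStepPart, pvIsProperty, hcond, if_true]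
      rw [pv_modifyA pr r hs hp]
      exact ih hrest (pr ++ [r]) sw
    · have hcond : pvProperties.contains r.2 = false := by
        simp only [pvProperties, List.contains_eq_mem, decide_eq_false_iff_not]; exact hp
      simp only [List.foldl_cons, pvStepA, pvStepPart, pvIsProperty, hcond,
        Bool.false_eq_true, if_false]
      exact ih hrest pr (sw ++ [r])

-- ===== VERDICT (by name: the statements are the Claim_ definitions above) =====
theorem ruleparser_spec : Claim_equal_ruleparser := by
  intro rules _ hpre
  unfold Spec_ruleparser
  have hinit : PySem.Dict.ofList (pvNouns.map (fun noun => (noun, pvMakeBehaviour false false false)))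
      = pvMkA [] := rfl
  simp only [ruleparser, ruleparser_alt, hinit, pv_loop_inv rules hpre [] []]
  rfl
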